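-- pv_equiv track=rewrite | github.com/samdmarshall/SDKBuild | sdkbuild/commandparse/InputHandler.py | GetArguments
-- ===== SOURCE A (Python) =====
-- def GetArguments(arguments_str):
--     arg_words = [];
--     input_split = arguments_str.split(' ');
--     offset = 0;
--     counter = 0;
--     current_word = '';
--     while counter < len(input_split):
--         word = input_split[counter];
--         current_word += word;
--         if len(current_word) == 0:
--             offset += 1;
--         else:
--             if offset >= 0:
--                 curr = offset + len(word);
--                 prev = curr - 1
--                 if arguments_str[prev:curr] != '\\':
--                     arg_words.append(current_word);
--                     current_word = '';
--                 else:
--                     current_word += ' ';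
--                 offset += len(word) + 1;
--         counter += 1;
--     return arg_words;
-- ===== SOURCE B (Python) =====
-- def GetArguments(arguments_str):
--     arg_words = []
--     buf = ''
--     for ch in arguments_str:
--         if ch == ' ':
--             if buf.endswith('\\'):
--                 buf += ' '
--             elif buf:
--                 arg_words.append(buf)
--                 buf = ''
--         else:
--             buf += ch
--     if buf and not buf.endswith('\\'):
--         arg_words.append(buf)
--     return arg_words
-- ===== Notes on version B (the rewrite author's own statement) =====
-- stated objective: simpler
-- what changed: Replaced A's split-on-space word loop with offset arithmetic and re-slicing of the original string by a single left-to-right character scan that keeps a buffer and flushes it at unescaped space boundaries (and at end of string when the buffer does not end in a backslash).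
import Mathlib
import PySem

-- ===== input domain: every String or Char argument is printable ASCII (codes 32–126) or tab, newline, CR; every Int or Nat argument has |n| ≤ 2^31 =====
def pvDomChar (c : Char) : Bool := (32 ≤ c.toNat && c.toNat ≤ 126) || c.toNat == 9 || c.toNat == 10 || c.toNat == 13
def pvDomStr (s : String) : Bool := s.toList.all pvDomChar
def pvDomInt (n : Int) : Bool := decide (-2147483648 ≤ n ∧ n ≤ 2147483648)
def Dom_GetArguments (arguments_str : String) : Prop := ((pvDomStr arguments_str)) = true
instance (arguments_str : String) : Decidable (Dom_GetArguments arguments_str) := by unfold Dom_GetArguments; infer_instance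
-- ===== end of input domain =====

-- B is a simpler single character scan (buffer + flush at unescaped spaces) replacing A's
-- split-on-space loop that re-reads the original string through offset arithmetic and slicing.

-- ===== PORT A =====
-- while-loop over the split words, with the running offset, current_word and arg_words as state
def aLoopGA (s : List Char) :
    List (List Char) → Int → List Char → List (List Char) → List (List Char)
  | [], _offset, _current_word, arg_words => arg_words
  | word :: rest, offset, current_word, arg_words =>
    let current_word := current_word ++ word
    if current_word.length = 0 then
      aLoopGA s rest (offset + 1) current_word arg_words
    else
      if 0 ≤ offset then
        let curr := offset + word.length
        let prev := curr - 1
        if PySem.List.slice s (some prev) (some curr) ≠ ['\\'] then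
          aLoopGA s rest (offset + word.length + 1) [] (arg_words ++ [current_word])
        else
          aLoopGA s rest (offset + word.length + 1) (current_word ++ [' ']) arg_words
      else
        aLoopGA s rest offset current_word arg_words

def GetArguments (arguments_str : String) : List String :=
  let s := arguments_str.toList
  let input_split := PySem.Chars.splitOn s [' ']
  (aLoopGA s input_split 0 [] []).map String.ofList

-- ===== PORT B =====
-- one step of Source B's character loop: state = (arg_words, buf)
def bStepGA (st : List (List Char) × List Char) (ch : Char) :
    List (List Char) × List Char :=
  if ch = ' ' then
    if PySem.Chars.endswith st.2 ['\\'] then (st.1, st.2 ++ [' '])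
    else if st.2 ≠ [] then (st.1 ++ [st.2], []) else st
  else (st.1, st.2 ++ [ch])

-- Source B's final flush after the loop
def bFlushGA (st : List (List Char) × List Char) : List (List Char) :=
  if st.2 ≠ [] ∧ ¬ PySem.Chars.endswith st.2 ['\\'] then st.1 ++ [st.2] else st.1

def GetArguments_alt (arguments_str : String) : List String :=
  (bFlushGA (arguments_str.toList.foldl bStepGA ([], []))).map String.ofList

-- ===== PRECONDITION & SPEC =====
def Spec_GetArguments (arguments_str : String) (out : List String) : Prop := out = GetArguments_alt arguments_str
instance (arguments_str : String) (out : List String) : Decidable (Spec_GetArguments arguments_str out) := by unfold Spec_GetArguments; infer_instance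

-- ===== CLAIM (what is proved, stated in full; the proofs are below) =====
def Claim_equal_GetArguments : Prop := ∀ (arguments_str : String), Dom_GetArguments arguments_str → Spec_GetArguments arguments_str (GetArguments arguments_str)

-- ===== LEMMAS AND PROOFS =====

-- structural model of str.split(' ') (accumulator reversed, as in PySem.Chars.splitOn.go)
def splitSp : List Char → List Char → List (List Char)
  | [], cur => [cur.reverse]
  | x :: rest, cur =>
    if x = ' ' then cur.reverse :: splitSp rest [] else splitSp rest (x :: cur)

-- ' '.join of the split words
def joinSp : List (List Char) → List Char
  | [] => []
  | [w] => w
  | w :: ws => w ++ ' ' :: joinSp ws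

-- word-level common specification of both programs
def wspec : List (List Char) → List Char → List (List Char) → List (List Char)
  | [], _cw, acc => acc
  | w :: ws, cw, acc =>
    if cw ++ w = [] then wspec ws (cw ++ w) acc
    else if w.getLast? = some '\\' then wspec ws (cw ++ w ++ [' ']) acc
    else wspec ws [] (acc ++ [cw ++ w])

lemma splitOn_go_eq (s : List Char) : ∀ (fuel : Nat) (cur : List Char) (acc : List (List Char)),
    s.length ≤ fuel →
    PySem.Chars.splitOn.go [' '] fuel s cur acc = acc.reverse ++ splitSp s cur := by
  induction s with
  | nil =>
    intro fuel cur acc _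
    cases fuel <;> simp [PySem.Chars.splitOn.go, splitSp]
  | cons x rest ih =>
    intro fuel cur acc hle
    cases fuel with
    | zero => simp at hle
    | succ n =>
      rw [PySem.Chars.splitOn.go]
      by_cases hx : x = ' '
      · subst hx
        simp only [List.isPrefixOf, BEq.rfl, Bool.true_and, if_pos, List.length_cons,
          List.length_nil, List.drop_succ_cons, List.drop_zero]
        rw [ih n [] (cur.reverse :: acc) (by simpa using Nat.lt_succ_iff.mp (by simpa using hle))]
        simp [splitSp]
      · have : ¬ ([' '].isPrefixOf (x :: rest) = true) := by
          simp [List.isPrefixOf]; intro h; exact absurd h.symm hx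
        simp only [this]; simp only [Bool.false_eq_true, if_false]
        rw [ih n (x :: cur) acc (by simpa using Nat.lt_succ_iff.mp (by simpa using hle))]
        simp [splitSp, hx]

lemma splitOn_eq (s : List Char) : PySem.Chars.splitOn s [' '] = splitSp s [] := by
  rw [PySem.Chars.splitOn, splitOn_go_eq s (s.length+1) [] [] (by omega)]
  simp

lemma splitSp_ne_nil (s cur : List Char) : splitSp s cur ≠ [] := by
  induction s generalizing cur with
  | nil => simp [splitSp]
  | cons x rest ih =>
    simp only [splitSp]
    split <;> simp [ih]

lemma joinSp_cons_cons (w : List Char) (ws : List (List Char)) (h : ws ≠ []) :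
    joinSp (w :: ws) = w ++ ' ' :: joinSp ws := by
  cases ws with
  | nil => exact absurd rfl h
  | cons b l => rfl

lemma join_splitSp (s : List Char) : ∀ cur, joinSp (splitSp s cur) = cur.reverse ++ s := by
  induction s with
  | nil => intro cur; simp [splitSp, joinSp]
  | cons x rest ih =>
    intro cur
    simp only [splitSp]
    by_cases hx : x = ' '
    · subst hx
      rw [if_pos rfl, joinSp_cons_cons _ _ (splitSp_ne_nil _ _), ih []]
      simp
    · rw [if_neg hx, ih (x :: cur)]
      simp

lemma splitSp_no_space (s : List Char) : ∀ cur w, (∀ c ∈ cur, c ≠ ' ') →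
    w ∈ splitSp s cur → ∀ c ∈ w, c ≠ ' ' := by
  induction s with
  | nil =>
    intro cur w hcur hw
    simp [splitSp] at hw
    subst hw
    intro c hc; exact hcur c (List.mem_reverse.mp hc)
  | cons x rest ih =>
    intro cur w hcur hw
    simp only [splitSp] at hw
    by_cases hx : x = ' '
    · subst hx
      rw [if_pos rfl] at hw
      rcases List.mem_cons.mp hw with h | h
      · subst h; intro c hc; exact hcur c (List.mem_reverse.mp hc)
      · exact ih [] w (by simp) h
    · rw [if_neg hx] at hw
      exact ih (x :: cur) w (by intro c hc; rcases List.mem_cons.mp hc with rfl | h; exact hx; exact hcur c h) hw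

lemma sliceLast (u v : List Char) (hu : u ≠ []) :
    PySem.List.slice (u ++ v) (some ((u.length : Int) - 1)) (some (u.length : Int)) =
      [u.getLast hu] := by
  have hlen : 1 ≤ u.length := List.length_pos_iff.mpr hu
  have h1 : ((u.length : Int) - 1) = ((u.length - 1 : Nat) : Int) := by omega
  rw [h1, PySem.List.slice_natCast]
  have hdrop : (u ++ v).drop (u.length - 1) = u.getLast hu :: v := by
    rcases List.eq_nil_or_concat u with rfl | ⟨t, a, rfl⟩
    · simp at hu
    · simp only [List.concat_eq_append] at hu ⊢
      rw [List.getLast_concat, List.length_append, List.length_singleton, Nat.add_sub_cancel,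
        List.append_assoc, List.drop_append_of_le_length (le_refl _), List.drop_length]
      rfl
  rw [hdrop]
  have : u.length - (u.length - 1) = 1 := by omega
  rw [this]
  simp

lemma endswith_single (l : List Char) (c : Char) :
    PySem.Chars.endswith l [c] = true ↔ l.getLast? = some c := by
  rw [PySem.Chars.endswith_iff]
  constructor
  · rintro ⟨t, rfl⟩; simp
  · intro h
    rcases List.eq_nil_or_concat l with rfl | ⟨t, a, rfl⟩
    · simp at h
    · simp at h; subst h; exact ⟨t, by simp⟩

lemma endsw_iff (cw w : List Char) (hcw : cw = [] ∨ cw.getLast? = some ' ') :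
    PySem.Chars.endswith (cw ++ w) ['\\'] = true ↔ w.getLast? = some '\\' := by
  rw [endswith_single]
  cases w with
  | nil =>
    simp only [List.append_nil, List.getLast?_nil]
    rcases hcw with rfl | h
    · simp
    · rw [h]; simp
  | cons x xs =>
    rw [List.getLast?_append_cons]

lemma aLoop_eq (s : List Char) : ∀ (ws : List (List Char)) (pre cw : List Char)
    (acc : List (List Char)),
    s = pre ++ joinSp ws →
    (pre = [] ∨ pre.getLast? = some ' ') →
    (cw ≠ [] → pre ≠ []) →
    aLoopGA s ws (pre.length : Int) cw acc = wspec ws cw acc := by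
  intro ws
  induction ws with
  | nil => intro pre cw acc _ _ _; rfl
  | cons w ws ih =>
    intro pre cw acc hs hpre hcwpre
    by_cases h0 : cw ++ w = []
    · have hcw : cw = [] := (List.append_eq_nil_iff.mp h0).1
      have hw : w = [] := (List.append_eq_nil_iff.mp h0).2
      subst hcw; subst hw
      simp only [aLoopGA, wspec, List.append_nil, List.length_nil,
        List.nil_append]
      cases ws with
      | nil => rfl
      | cons w2 ws' =>
        have hc : (pre.length : Int) + 1 = (((pre ++ [' ']).length : Nat) : Int) := by
          simp
        rw [hc]
        apply ih (pre ++ [' ']) [] acc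
        · rw [hs, joinSp_cons_cons _ _ (by simp)]; simp
        · right; exact List.getLast?_concat
        · simp
    · have hpw : pre ++ w ≠ [] := by
        by_cases hw : w = []
        · subst hw
          simp only [List.append_nil] at h0 ⊢
          exact hcwpre h0
        · simp [hw]
      have htail : s = (pre ++ w) ++ (if ws = [] then [] else ' ' :: joinSp ws) := by
        cases ws with
        | nil => simpa [joinSp] using hs
        | cons a b =>
          rw [hs, joinSp_cons_cons _ _ (by simp)]
          simp
      have hkey : PySem.List.slice s (some ((pre.length : Int) + (w.length : Int) - 1))
          (some ((pre.length : Int) + (w.length : Int))) = [(pre ++ w).getLast hpw] := by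
        have hlen : (pre.length : Int) + (w.length : Int) = (((pre ++ w).length : Nat) : Int) := by
          simp
        rw [hlen, htail, sliceLast]
      have hlastiff : ((pre ++ w).getLast hpw = '\\') ↔ w.getLast? = some '\\' := by
        by_cases hw : w = []
        · subst hw
          have hpre' : pre ≠ [] := by simpa using hpw
          rcases hpre with rfl | hlp
          · exact absurd rfl hpre'
          · have hsp : (pre ++ []).getLast hpw = ' ' := by
              have : pre.getLast hpre' = ' ' := List.getLast_of_mem_getLast? hlp
              simpa [List.getLast_append_of_ne_nil] using this
            rw [hsp]
            simp
        · rw [List.getLast_append_of_ne_nil hpw hw]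
          rw [List.getLast?_eq_some_getLast hw]
          simp
      simp only [aLoopGA]
      have hlen0 : ¬ ((cw ++ w).length = 0) := by
        simpa [List.length_eq_zero_iff] using h0
      rw [if_neg hlen0, if_pos (Int.natCast_nonneg pre.length), hkey]
      by_cases hbs : w.getLast? = some '\\'
      · rw [if_neg (by simp [hlastiff.mpr hbs])]
        rw [wspec.eq_def]
        simp only [if_neg h0, if_pos hbs]
        cases ws with
        | nil => rfl
        | cons a b =>
          have hc : (pre.length : Int) + (w.length : Int) + 1 =
              (((pre ++ w ++ [' ']).length : Nat) : Int) := by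
            simp
            omega
          rw [hc]
          apply ih
          · rw [hs, joinSp_cons_cons _ _ (by simp)]; simp
          · right; exact List.getLast?_concat
          · intro _; simp
      · rw [if_pos (by simpa using fun h => hbs (hlastiff.mp h))]
        rw [wspec.eq_def]
        simp only [if_neg h0, if_neg hbs]
        cases ws with
        | nil => rfl
        | cons a b =>
          have hc : (pre.length : Int) + (w.length : Int) + 1 =
              (((pre ++ w ++ [' ']).length : Nat) : Int) := by
            simp
            omega
          rw [hc]
          apply ih
          · rw [hs, joinSp_cons_cons _ _ (by simp)]; simp
          · right; exact List.getLast?_concat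
          · simp

lemma scan_word (w : List Char) : ∀ (acc : List (List Char)) (cw : List Char),
    (∀ c ∈ w, c ≠ ' ') →
    List.foldl bStepGA (acc, cw) w = (acc, cw ++ w) := by
  induction w with
  | nil => intro acc cw _; simp
  | cons x rest ih =>
    intro acc cw h
    have hx : x ≠ ' ' := h x (by simp)
    simp only [List.foldl_cons, bStepGA, if_neg hx]
    rw [ih acc (cw ++ [x]) (fun c hc => h c (by simp [hc]))]
    simp

lemma scanB (ws : List (List Char)) : ∀ (w cw : List Char) (acc : List (List Char)),
    (∀ c ∈ w, c ≠ ' ') → (∀ u ∈ ws, ∀ c ∈ u, c ≠ ' ') →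
    (cw = [] ∨ cw.getLast? = some ' ') →
    bFlushGA (List.foldl bStepGA (acc, cw) (joinSp (w :: ws))) =
      wspec (w :: ws) cw acc := by
  induction ws with
  | nil =>
    intro w cw acc hw _ hcw
    rw [show joinSp [w] = w from rfl, scan_word w acc cw hw]
    have hrw : wspec [w] cw acc =
        (if cw ++ w = [] then acc
         else if w.getLast? = some '\\' then acc else acc ++ [cw ++ w]) := rfl
    rw [hrw]
    unfold bFlushGA
    by_cases h0 : cw ++ w = []
    · rw [if_pos h0, if_neg (by simp [h0])]
    · by_cases hb : w.getLast? = some '\\'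
      · have he : PySem.Chars.endswith (cw ++ w) ['\\'] = true := (endsw_iff cw w hcw).mpr hb
        rw [if_neg h0, if_pos hb]
        simp [he]
      · have he : ¬ PySem.Chars.endswith (cw ++ w) ['\\'] = true :=
          fun h => hb ((endsw_iff cw w hcw).mp h)
        rw [if_neg h0, if_neg hb]
        simp [h0, he]
  | cons w2 ws ih =>
    intro w cw acc hw hws hcw
    rw [joinSp_cons_cons _ _ (by simp),
      show w ++ ' ' :: joinSp (w2 :: ws) = w ++ ([' '] ++ joinSp (w2 :: ws)) from rfl,
      List.foldl_append, scan_word w acc cw hw, List.foldl_append, List.foldl_cons,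
      List.foldl_nil]
    have hrw : wspec (w :: w2 :: ws) cw acc =
        (if cw ++ w = [] then wspec (w2 :: ws) (cw ++ w) acc
         else if w.getLast? = some '\\' then wspec (w2 :: ws) (cw ++ w ++ [' ']) acc
         else wspec (w2 :: ws) [] (acc ++ [cw ++ w])) := rfl
    rw [hrw]
    by_cases h0 : cw ++ w = []
    · have hstep : bStepGA (acc, cw ++ w) ' ' = (acc, cw ++ w) := by
        rw [h0]; rfl
      rw [if_pos h0, hstep]
      exact ih w2 (cw ++ w) acc (hws w2 (by simp)) (fun u hu => hws u (by simp [hu]))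
        (Or.inl h0)
    · by_cases hb : w.getLast? = some '\\'
      · have he : PySem.Chars.endswith (cw ++ w) ['\\'] = true := (endsw_iff cw w hcw).mpr hb
        have hstep : bStepGA (acc, cw ++ w) ' ' = (acc, cw ++ w ++ [' ']) := by
          simp [bStepGA, he]
        rw [if_neg h0, if_pos hb, hstep]
        have := ih w2 (cw ++ w ++ [' ']) acc (hws w2 (by simp))
          (fun u hu => hws u (by simp [hu])) (Or.inr List.getLast?_concat)
        simpa using this
      · have he : PySem.Chars.endswith (cw ++ w) ['\\'] = false := by
          by_contra h
          exact hb ((endsw_iff cw w hcw).mp (by simpa using h))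
        have hstep : bStepGA (acc, cw ++ w) ' ' = (acc ++ [cw ++ w], []) := by
          simp [bStepGA, he, h0]
        rw [if_neg h0, if_neg hb, hstep]
        exact ih w2 [] (acc ++ [cw ++ w]) (hws w2 (by simp))
          (fun u hu => hws u (by simp [hu])) (Or.inl rfl)

-- ===== VERDICT (by name: the statement is the Claim_ definition above) =====
theorem GetArguments_spec : Claim_equal_GetArguments := by
  intro str _dom
  unfold Spec_GetArguments GetArguments GetArguments_alt
  simp only [splitOn_eq]
  obtain ⟨w, ws, hsplit⟩ := List.exists_cons_of_ne_nil (splitSp_ne_nil str.toList [])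
  have hjoin : joinSp (splitSp str.toList []) = str.toList := by
    simpa using join_splitSp str.toList []
  have hns : ∀ u ∈ splitSp str.toList [], ∀ c ∈ u, c ≠ ' ' :=
    fun u hu => splitSp_no_space str.toList [] u (by simp) hu
  have hA : aLoopGA str.toList (splitSp str.toList []) 0 [] [] =
      wspec (splitSp str.toList []) [] [] := by
    have := aLoop_eq str.toList (splitSp str.toList []) [] [] []
      (by simp [hjoin]) (Or.inl rfl) (by simp)
    simpa using this
  have hB : bFlushGA (List.foldl bStepGA ([], []) str.toList) =
      wspec (splitSp str.toList []) [] [] := by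
    conv_lhs => rw [← hjoin, hsplit]
    rw [hsplit]
    exact scanB ws w [] [] (hns w (by rw [hsplit]; simp))
      (fun u hu => hns u (by rw [hsplit]; simp [hu])) (Or.inl rfl)
  rw [hA, hB]
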